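-- pv_equiv track=rewrite | github.com/grace-mengke-hu/COVID | utilFunc.py | numUserInBin
-- ===== SOURCE A (Python) =====
-- def numUserInBin(weekBin, userList, timeList):
-- 	numUserInBinList = []
-- 	for i in range(len(weekBin)-1):
-- 		currentBinUser = set()
-- 		for j in range(len(timeList)):
-- 			if timeList[j]>=weekBin[i] and timeList[j]<=weekBin[i+1]:
-- 				currentBinUser.add(userList[j])
--
-- 		numUserInBinList.append(len(currentBinUser))
-- 	return numUserInBinList
-- ===== SOURCE B (Python) =====
-- def _lowerBound(events, x):
--     lo, hi = 0, len(events)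
--     while lo < hi:
--         mid = (lo + hi) // 2
--         if events[mid][0] < x:
--             lo = mid + 1
--         else:
--             hi = mid
--     return lo
--
--
-- def _upperBound(events, x):
--     lo, hi = 0, len(events)
--     while lo < hi:
--         mid = (lo + hi) // 2
--         if events[mid][0] <= x:
--             lo = mid + 1
--         else:
--             hi = mid
--     return lo
--
--
-- def numUserInBin(weekBin, userList, timeList):
--     events = sorted(zip(timeList, userList), key=lambda p: p[0])
--     out = []
--     for lo, hi in zip(weekBin, weekBin[1:]):
--         L = _lowerBound(events, lo)
--         R = _upperBound(events, hi)
--         out.append(len({u for _, u in events[L:R]}))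
--     return out
-- ===== Notes on version B (the rewrite author's own statement) =====
-- stated objective: faster
-- what changed: B sorts the (time,user) pairs by time once, then answers each bin by binary-searching its two boundaries into the sorted list and counting the distinct users of that contiguous slice, instead of A's full rescan of all events for every bin.
import Mathlib
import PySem

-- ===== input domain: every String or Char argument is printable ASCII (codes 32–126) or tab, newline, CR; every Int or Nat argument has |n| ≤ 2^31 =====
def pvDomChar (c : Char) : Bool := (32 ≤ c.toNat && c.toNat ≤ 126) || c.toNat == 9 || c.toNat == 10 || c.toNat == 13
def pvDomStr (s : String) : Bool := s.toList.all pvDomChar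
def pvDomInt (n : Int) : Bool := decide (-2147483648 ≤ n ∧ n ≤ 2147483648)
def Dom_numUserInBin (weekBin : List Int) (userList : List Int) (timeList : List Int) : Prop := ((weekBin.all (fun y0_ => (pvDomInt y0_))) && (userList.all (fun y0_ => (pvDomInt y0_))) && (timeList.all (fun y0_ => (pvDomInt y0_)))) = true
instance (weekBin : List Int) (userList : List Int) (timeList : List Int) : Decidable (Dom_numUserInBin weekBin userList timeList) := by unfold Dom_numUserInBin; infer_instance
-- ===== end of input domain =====

-- B sorts the (time,user) pairs by time once, then answers each bin by binary-searching its two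
-- boundaries into the sorted list and counting the distinct users of that contiguous slice,
-- instead of A's full rescan of all events for every bin (objective: faster; measured).

-- ===== PORT A =====
def numUserInBin (weekBin : List Int) (userList : List Int) (timeList : List Int) : List Int :=
  (PySem.List.pyRange 0 (PySem.List.len weekBin - 1) 1).foldl (fun numUserInBinList i =>
    let currentBinUser : PySem.Set Int :=
      (PySem.List.pyRange 0 (PySem.List.len timeList) 1).foldl (fun currentBinUser j =>
        if PySem.List.pyGetD timeList j 0 ≥ PySem.List.pyGetD weekBin i 0 ∧
           PySem.List.pyGetD timeList j 0 ≤ PySem.List.pyGetD weekBin (i + 1) 0 then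
          PySem.Set.add currentBinUser (PySem.List.pyGetD userList j 0)
        else currentBinUser) PySem.Set.empty
    numUserInBinList ++ [PySem.Set.len currentBinUser]) []

-- ===== PORT B =====
-- while-loop of Source B's _lowerBound, as the obvious recursion on hi - lo
def pvLowerBound (events : List (Int × Int)) (x : Int) (lo hi : Int) : Int :=
  if _h : lo < hi then
    let mid := PySem.Int.floordiv (lo + hi) 2
    if (PySem.List.pyGetD events mid (0, 0)).1 < x then pvLowerBound events x (mid + 1) hi
    else pvLowerBound events x lo mid
  else lo
termination_by (hi - lo).toNat
decreasing_by
  · have hb := PySem.Int.floordiv_two_mid_bounds (lo := lo) (hi := hi) (le_of_lt _h)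
    omega
  · have hb := PySem.Int.floordiv_two_mid_bounds (lo := lo) (hi := hi) (le_of_lt _h)
    have hlt : PySem.Int.floordiv (lo + hi) 2 < hi := by
      rw [PySem.Int.floordiv_lt_iff_lt_mul (by omega)]; omega
    omega

-- while-loop of Source B's _upperBound
def pvUpperBound (events : List (Int × Int)) (x : Int) (lo hi : Int) : Int :=
  if _h : lo < hi then
    let mid := PySem.Int.floordiv (lo + hi) 2
    if (PySem.List.pyGetD events mid (0, 0)).1 ≤ x then pvUpperBound events x (mid + 1) hi
    else pvUpperBound events x lo mid
  else lo
termination_by (hi - lo).toNat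
decreasing_by
  · have hb := PySem.Int.floordiv_two_mid_bounds (lo := lo) (hi := hi) (le_of_lt _h)
    omega
  · have hb := PySem.Int.floordiv_two_mid_bounds (lo := lo) (hi := hi) (le_of_lt _h)
    have hlt : PySem.Int.floordiv (lo + hi) 2 < hi := by
      rw [PySem.Int.floordiv_lt_iff_lt_mul (by omega)]; omega
    omega

def numUserInBin_alt (weekBin : List Int) (userList : List Int) (timeList : List Int) : List Int :=
  let events := PySem.List.sorted (timeList.zip userList) (fun p => p.1) false
  (weekBin.zip (PySem.List.slice weekBin (some 1) none)).foldl (fun out b =>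
    let L := pvLowerBound events b.1 0 (PySem.List.len events)
    let R := pvUpperBound events b.2 0 (PySem.List.len events)
    out ++ [PySem.Set.len (PySem.Set.ofList
      ((PySem.List.slice events (some L) (some R)).map (fun p => p.2)))]) []

-- ===== PRECONDITION & SPEC =====
-- Pre_ excludes exactly the inputs on which A raises IndexError: a time at an index beyond
-- the length of userList that falls inside some bin (userList[j] is then out of range).
def Pre_numUserInBin (weekBin : List Int) (userList : List Int) (timeList : List Int) : Prop :=
  ∀ j < timeList.length,
    (∃ i < weekBin.length - 1,
        weekBin.getD i 0 ≤ timeList.getD j 0 ∧ timeList.getD j 0 ≤ weekBin.getD (i + 1) 0) →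
    j < userList.length
instance (weekBin : List Int) (userList : List Int) (timeList : List Int) : Decidable (Pre_numUserInBin weekBin userList timeList) := by unfold Pre_numUserInBin; infer_instance
def pvWitness_numUserInBin : List Int × List Int × List Int := ([0, 10], [1, 2], [5, 7])

def Spec_numUserInBin (weekBin : List Int) (userList : List Int) (timeList : List Int) (out : List Int) : Prop := out = numUserInBin_alt weekBin userList timeList
instance (weekBin : List Int) (userList : List Int) (timeList : List Int) (out : List Int) : Decidable (Spec_numUserInBin weekBin userList timeList out) := by unfold Spec_numUserInBin; infer_instance

-- ===== CLAIM (what is proved, stated in full; the proofs are below) =====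
def Claim_equal_numUserInBin : Prop := ∀ (weekBin : List Int) (userList : List Int) (timeList : List Int), Dom_numUserInBin weekBin userList timeList → Pre_numUserInBin weekBin userList timeList → Spec_numUserInBin weekBin userList timeList (numUserInBin weekBin userList timeList)

-- ===== LEMMAS AND PROOFS =====

-- Invariant of Source B's _lowerBound loop: it returns the first index whose time is ≥ x.
theorem pvLB_spec (events : List (Int × Int)) (x : Int)
    (hpair : events.Pairwise (fun a b => a.1 ≤ b.1)) :
    ∀ (m : Nat) (lo hi : Int), (hi - lo).toNat = m →
    0 ≤ lo → lo ≤ hi → hi ≤ events.length →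
    (∀ j (_ : j < events.length), j < lo.toNat → events[j].1 < x) →
    (∀ j (_ : j < events.length), hi.toNat ≤ j → x ≤ events[j].1) →
    0 ≤ pvLowerBound events x lo hi ∧ pvLowerBound events x lo hi ≤ events.length ∧
    (∀ j (_ : j < events.length), j < (pvLowerBound events x lo hi).toNat → events[j].1 < x) ∧
    (∀ j (_ : j < events.length), (pvLowerBound events x lo hi).toNat ≤ j → x ≤ events[j].1) := by
  intro m
  induction m using Nat.strong_induction_on with
  | _ m ih =>
    intro lo hi hm h0 hle hlen hbelow habove
    rw [pvLowerBound]
    by_cases h : lo < hi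
    · rw [dif_pos h]
      have hmid := PySem.Int.floordiv_two_mid_bounds (lo := lo) (hi := hi) (le_of_lt h)
      have hmlt : PySem.Int.floordiv (lo + hi) 2 < hi := by
        rw [PySem.Int.floordiv_lt_iff_lt_mul (by omega)]; omega
      set mid := PySem.Int.floordiv (lo + hi) 2 with hmiddef
      have hmidlen : mid.toNat < events.length := by omega
      have hget : PySem.List.pyGetD events mid (0, 0) = events[mid.toNat]'hmidlen :=
        PySem.List.pyGetD_eq_getElem events (0, 0) (by omega) (by omega)
      have hpw := (List.pairwise_iff_getElem).mp hpair
      by_cases hc : (PySem.List.pyGetD events mid (0, 0)).1 < x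
      · rw [if_pos hc]
        rw [hget] at hc
        refine ih (hi - (mid + 1)).toNat (by omega) (mid + 1) hi rfl (by omega) (by omega) hlen ?_ habove
        intro j hj hjlt
        rcases Nat.lt_or_ge j mid.toNat with hj2 | hj2
        · exact lt_of_le_of_lt (hpw j mid.toNat hj hmidlen hj2) hc
        · have : j = mid.toNat := by omega
          simpa [this] using hc
      · rw [if_neg hc]
        rw [hget] at hc
        push_neg at hc
        refine ih (mid - lo).toNat (by omega) lo mid rfl h0 (by omega) (by omega) hbelow ?_
        intro j hj hjge
        rcases Nat.lt_or_ge mid.toNat j with hj2 | hj2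
        · exact le_trans hc (hpw mid.toNat j hmidlen hj hj2)
        · have : j = mid.toNat := by omega
          simpa [this] using hc
    · rw [dif_neg h]
      refine ⟨h0, le_trans hle hlen, hbelow, ?_⟩
      intro j hj hjge
      exact habove j hj (by omega)

-- Invariant of Source B's _upperBound loop: it returns the first index whose time is > x.
theorem pvUB_spec (events : List (Int × Int)) (x : Int)
    (hpair : events.Pairwise (fun a b => a.1 ≤ b.1)) :
    ∀ (m : Nat) (lo hi : Int), (hi - lo).toNat = m →
    0 ≤ lo → lo ≤ hi → hi ≤ events.length →
    (∀ j (_ : j < events.length), j < lo.toNat → events[j].1 ≤ x) →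
    (∀ j (_ : j < events.length), hi.toNat ≤ j → x < events[j].1) →
    0 ≤ pvUpperBound events x lo hi ∧ pvUpperBound events x lo hi ≤ events.length ∧
    (∀ j (_ : j < events.length), j < (pvUpperBound events x lo hi).toNat → events[j].1 ≤ x) ∧
    (∀ j (_ : j < events.length), (pvUpperBound events x lo hi).toNat ≤ j → x < events[j].1) := by
  intro m
  induction m using Nat.strong_induction_on with
  | _ m ih =>
    intro lo hi hm h0 hle hlen hbelow habove
    rw [pvUpperBound]
    by_cases h : lo < hi
    · rw [dif_pos h]
      have hmid := PySem.Int.floordiv_two_mid_bounds (lo := lo) (hi := hi) (le_of_lt h)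
      have hmlt : PySem.Int.floordiv (lo + hi) 2 < hi := by
        rw [PySem.Int.floordiv_lt_iff_lt_mul (by omega)]; omega
      set mid := PySem.Int.floordiv (lo + hi) 2 with hmiddef
      have hmidlen : mid.toNat < events.length := by omega
      have hget : PySem.List.pyGetD events mid (0, 0) = events[mid.toNat]'hmidlen :=
        PySem.List.pyGetD_eq_getElem events (0, 0) (by omega) (by omega)
      have hpw := (List.pairwise_iff_getElem).mp hpair
      by_cases hc : (PySem.List.pyGetD events mid (0, 0)).1 ≤ x
      · rw [if_pos hc]
        rw [hget] at hc
        refine ih (hi - (mid + 1)).toNat (by omega) (mid + 1) hi rfl (by omega) (by omega) hlen ?_ habove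
        intro j hj hjlt
        rcases Nat.lt_or_ge j mid.toNat with hj2 | hj2
        · exact le_trans (hpw j mid.toNat hj hmidlen hj2) hc
        · have : j = mid.toNat := by omega
          simpa [this] using hc
      · rw [if_neg hc]
        rw [hget] at hc
        push_neg at hc
        refine ih (mid - lo).toNat (by omega) lo mid rfl h0 (by omega) (by omega) hbelow ?_
        intro j hj hjge
        rcases Nat.lt_or_ge mid.toNat j with hj2 | hj2
        · exact lt_of_lt_of_le hc (hpw mid.toNat j hmidlen hj hj2)
        · have : j = mid.toNat := by omega
          simpa [this] using hc
    · rw [dif_neg h]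
      refine ⟨h0, le_trans hle hlen, hbelow, ?_⟩
      intro j hj hjge
      exact habove j hj (by omega)

-- Membership in A's conditional set-building fold.
theorem pvMemFold (lo hi : Int) (l : List (Int × Int)) (s : PySem.Set Int) (x : Int) :
    x ∈ l.foldl (fun s tu => if lo ≤ tu.1 ∧ tu.1 ≤ hi then PySem.Set.add s tu.2 else s) s ↔
    x ∈ s ∨ ∃ p ∈ l, (lo ≤ p.1 ∧ p.1 ≤ hi) ∧ p.2 = x := by
  induction l generalizing s with
  | nil => simp
  | cons p l ih =>
    simp only [List.foldl_cons]
    by_cases hc : lo ≤ p.1 ∧ p.1 ≤ hi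
    · rw [if_pos hc, ih]
      simp only [PySem.Set.mem_add, List.mem_cons]
      constructor
      · rintro ((h | h) | ⟨q, hq, hcq, hqx⟩)
        · exact Or.inl h
        · exact Or.inr ⟨p, Or.inl rfl, hc, h.symm⟩
        · exact Or.inr ⟨q, Or.inr hq, hcq, hqx⟩
      · rintro (h | ⟨q, (rfl | hq), hcq, hqx⟩)
        · exact Or.inl (Or.inl h)
        · exact Or.inl (Or.inr hqx.symm)
        · exact Or.inr ⟨q, hq, hcq, hqx⟩
    · rw [if_neg hc, ih]
      simp only [List.mem_cons]
      constructor
      · rintro (h | ⟨q, hq, hcq, hqx⟩)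
        · exact Or.inl h
        · exact Or.inr ⟨q, Or.inr hq, hcq, hqx⟩
      · rintro (h | ⟨q, (rfl | hq), hcq, hqx⟩)
        · exact Or.inl h
        · exact absurd hcq hc
        · exact Or.inr ⟨q, hq, hcq, hqx⟩

-- A's conditional fold keeps the set duplicate-free.
theorem pvNodupFold (lo hi : Int) (l : List (Int × Int)) (s : PySem.Set Int) (hs : s.Nodup) :
    (l.foldl (fun s tu => if lo ≤ tu.1 ∧ tu.1 ≤ hi then PySem.Set.add s tu.2 else s) s).Nodup := by
  induction l generalizing s with
  | nil => exact hs
  | cons p l ih =>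
    simp only [List.foldl_cons]
    split_ifs with hc
    · exact ih _ (PySem.Set.nodup_add _ _ hs)
    · exact ih _ hs

-- Two duplicate-free lists with the same members have the same Python set length.
theorem pvLenEq (s t : List Int) (hs : s.Nodup) (ht : t.Nodup)
    (h : ∀ x, x ∈ s ↔ x ∈ t) : PySem.Set.len s = PySem.Set.len t := by
  have hperm : s.Perm t := (List.perm_ext_iff_of_nodup hs ht).mpr h
  simp [PySem.Set.len, hperm.length_eq]

-- Per bin [lo, hi]: A's scan of all (time,user) pairs builds a set of the same size as the
-- distinct users of B's binary-searched slice of the sorted pairs.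
theorem pvBinEq (timeList userList : List Int) (lo hi : Int) :
    PySem.Set.len ((timeList.zip userList).foldl (fun s tu =>
        if lo ≤ tu.1 ∧ tu.1 ≤ hi then PySem.Set.add s tu.2 else s) PySem.Set.empty)
    = PySem.Set.len (PySem.Set.ofList
        ((PySem.List.slice (PySem.List.sorted (timeList.zip userList) (fun p => p.1) false)
          (some (pvLowerBound (PySem.List.sorted (timeList.zip userList) (fun p => p.1) false) lo 0
            (PySem.List.len (PySem.List.sorted (timeList.zip userList) (fun p => p.1) false))))
          (some (pvUpperBound (PySem.List.sorted (timeList.zip userList) (fun p => p.1) false) hi 0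
            (PySem.List.len (PySem.List.sorted (timeList.zip userList) (fun p => p.1) false))))).map
          (fun p => p.2))) := by
  set events := PySem.List.sorted (timeList.zip userList) (fun p => p.1) false with hev
  have hpair : events.Pairwise (fun a b => a.1 ≤ b.1) := PySem.List.sorted_pairwise _ _
  have hlen : PySem.List.len events = (events.length : Int) := PySem.List.len_eq events
  set L := pvLowerBound events lo 0 (PySem.List.len events) with hL
  set R := pvUpperBound events hi 0 (PySem.List.len events) with hR
  have hLspec := pvLB_spec events lo hpair (events.length : Int).toNat 0 events.length
    (by simp) (by omega) (by exact_mod_cast Int.ofNat_nonneg _) (by simp)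
    (by intro j hj hjlt; omega) (by intro j hj hjge; simp at hjge; omega)
  have hRspec := pvUB_spec events hi hpair (events.length : Int).toNat 0 events.length
    (by simp) (by omega) (by exact_mod_cast Int.ofNat_nonneg _) (by simp)
    (by intro j hj hjlt; omega) (by intro j hj hjge; simp at hjge; omega)
  rw [hlen] at hL hR
  obtain ⟨hL0, hLlen, hLlt, hLge⟩ := hLspec
  obtain ⟨hR0, hRlen, hRle, hRgt⟩ := hRspec
  rw [← hL] at hL0 hLlen hLlt hLge
  rw [← hR] at hR0 hRlen hRle hRgt
  have hslice : PySem.List.slice events (some L) (some R)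
      = (events.drop L.toNat).take (R.toNat - L.toNat) :=
    PySem.List.slice_toNat events hL0 hR0
  -- membership in the slice is exactly membership with the bin condition
  have hmemseg : ∀ p : Int × Int,
      p ∈ PySem.List.slice events (some L) (some R) ↔
      p ∈ events ∧ lo ≤ p.1 ∧ p.1 ≤ hi := by
    intro p
    rw [hslice]
    constructor
    · intro hp
      obtain ⟨i, hilt, hieq⟩ := List.mem_iff_getElem.mp hp
      have hi1 : i < R.toNat - L.toNat := lt_of_lt_of_le hilt (by
        simpa using List.length_take_le (R.toNat - L.toNat) (events.drop L.toNat))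
      have hi2 : L.toNat + i < events.length := by
        have := hilt
        simp [List.length_take, List.length_drop] at this
        omega
      have hieq2 : ((events.drop L.toNat).take (R.toNat - L.toNat))[i] = events[L.toNat + i] := by
        rw [List.getElem_take, List.getElem_drop]
      rw [hieq2] at hieq
      subst hieq
      refine ⟨List.getElem_mem _, ?_, ?_⟩
      · exact hLge (L.toNat + i) hi2 (by omega)
      · exact hRle (L.toNat + i) hi2 (by omega)
    · rintro ⟨hp, hlo, hhi⟩
      obtain ⟨j, hjlt, hjeq⟩ := List.mem_iff_getElem.mp hp
      have hjL : L.toNat ≤ j := by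
        by_contra hcon
        have := hLlt j hjlt (by omega)
        rw [hjeq] at this
        omega
      have hjR : j < R.toNat := by
        by_contra hcon
        have := hRgt j hjlt (by omega)
        rw [hjeq] at this
        omega
      apply List.mem_iff_getElem.mpr
      refine ⟨j - L.toNat, ?_, ?_⟩
      · simp [List.length_take, List.length_drop]
        omega
      · rw [List.getElem_take, List.getElem_drop]
        simpa [show L.toNat + (j - L.toNat) = j from by omega] using hjeq
  apply pvLenEq
  · exact pvNodupFold lo hi _ _ List.nodup_nil
  · exact PySem.Set.nodup_ofList _
  · intro x
    rw [pvMemFold, PySem.Set.mem_ofList, List.mem_map]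
    constructor
    · rintro (h | ⟨p, hp, hcp, hpx⟩)
      · simp [PySem.Set.empty] at h
      · exact ⟨p, (hmemseg p).mpr ⟨(PySem.List.mem_sorted _ _ _ _).mpr hp, hcp⟩, hpx⟩
    · rintro ⟨p, hp, hpx⟩
      obtain ⟨hpe, hcp⟩ := (hmemseg p).mp hp
      exact Or.inr ⟨p, (PySem.List.mem_sorted _ _ _ _).mp hpe, hcp, hpx⟩

-- A's enumerated inner loop equals the fold over the zipped pairs, provided every time
-- from position a on that lies in [lo, hi] has a matching user entry.
theorem pvA_inner (lo hi : Int) :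
    ∀ (tl : List Int) (ul : List Int) (a : Nat) (s : PySem.Set Int),
    (∀ k < tl.length, lo ≤ tl.getD k 0 ∧ tl.getD k 0 ≤ hi → a + k < ul.length) →
    (PySem.List.enumerate tl (a : Int)).foldl (fun s jt =>
        if lo ≤ jt.2 ∧ jt.2 ≤ hi then PySem.Set.add s (PySem.List.pyGetD ul jt.1 0) else s) s
    = (tl.zip (ul.drop a)).foldl (fun s tu =>
        if lo ≤ tu.1 ∧ tu.1 ≤ hi then PySem.Set.add s tu.2 else s) s := by
  intro tl
  induction tl with
  | nil => intro ul a s h; simp [PySem.List.enumerate_nil]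
  | cons t tl ih =>
    intro ul a s h
    rw [PySem.List.enumerate_cons, List.foldl_cons]
    have hcast : (a : Int) + 1 = ((a + 1 : Nat) : Int) := by push_cast; ring
    have hrest : ∀ k < tl.length, lo ≤ tl.getD k 0 ∧ tl.getD k 0 ≤ hi →
        (a + 1) + k < ul.length := by
      intro k hk hin
      have := h (k + 1) (by simp; omega) (by simpa using hin)
      omega
    by_cases hc : lo ≤ t ∧ t ≤ hi
    · have ha : a < ul.length := by
        have := h 0 (by simp) (by simpa using hc)
        omega
      have hdrop : ul.drop a = ul[a] :: ul.drop (a + 1) := List.drop_eq_getElem_cons ha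
      have hget : PySem.List.pyGetD ul (a : Int) 0 = ul[a] := by
        rw [PySem.List.pyGetD_natCast]
        exact List.getD_eq_getElem ul 0 ha
      rw [hdrop]
      simp only [List.zip_cons_cons, List.foldl_cons]
      rw [if_pos hc, if_pos hc, hget, hcast]
      exact ih ul (a + 1) (PySem.Set.add s ul[a]) hrest
    · rw [if_neg hc, hcast]
      cases hdrop : ul.drop a with
      | nil =>
        have hd1 : ul.drop (a + 1) = [] := by
          simp only [List.drop_eq_nil_iff] at hdrop ⊢; omega
        rw [ih ul (a + 1) s hrest, hd1]
        simp
      | cons v rest =>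
        have ha : a < ul.length := by
          by_contra hge
          have : ul.drop a = [] := List.drop_eq_nil_iff.mpr (by omega)
          simp [this] at hdrop
        have hdrop' : ul.drop a = ul[a] :: ul.drop (a + 1) := List.drop_eq_getElem_cons ha
        have hrest' : rest = ul.drop (a + 1) := by
          rw [hdrop] at hdrop'; exact (List.cons.injEq _ _ _ _ ▸ hdrop').2
        rw [ih ul (a + 1) s hrest, ← hrest']
        simp only [List.zip_cons_cons, List.foldl_cons, if_neg hc]

-- Per bin index k: A's inner scan builds the same set as the fold over the zipped pairs.
theorem pvKey (weekBin userList timeList : List Int)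
    (hpre : Pre_numUserInBin weekBin userList timeList)
    (k : Nat) (hk : k + 1 < weekBin.length) :
    (PySem.List.pyRange 0 (PySem.List.len timeList) 1).foldl (fun s j =>
        if PySem.List.pyGetD timeList j 0 ≥ PySem.List.pyGetD weekBin (k : Int) 0 ∧
           PySem.List.pyGetD timeList j 0 ≤ PySem.List.pyGetD weekBin ((k : Int) + 1) 0 then
          PySem.Set.add s (PySem.List.pyGetD userList j 0)
        else s) PySem.Set.empty
    = (timeList.zip userList).foldl (fun s tu =>
        if weekBin[k]'(by omega) ≤ tu.1 ∧ tu.1 ≤ weekBin[k + 1]'hk then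
          PySem.Set.add s tu.2 else s) PySem.Set.empty := by
  have hlo : PySem.List.pyGetD weekBin (k : Int) 0 = weekBin[k]'(by omega) := by
    rw [PySem.List.pyGetD_natCast]; exact List.getD_eq_getElem weekBin 0 (by omega)
  have hhi : PySem.List.pyGetD weekBin ((k : Int) + 1) 0 = weekBin[k + 1]'hk := by
    have : (k : Int) + 1 = ((k + 1 : Nat) : Int) := by push_cast; ring
    rw [this, PySem.List.pyGetD_natCast]; exact List.getD_eq_getElem weekBin 0 hk
  have henum : PySem.List.enumerate timeList (0 : Int)
      = (PySem.List.pyRange 0 (PySem.List.len timeList) 1).map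
          (fun j => (j, PySem.List.pyGetD timeList j 0)) :=
    PySem.List.enumerate_eq_map_pyRange timeList 0
  set lo := weekBin[k]'(by omega : k < weekBin.length) with hlodef
  set hi := weekBin[k + 1]'hk with hhidef
  have h1 : (PySem.List.pyRange 0 (PySem.List.len timeList) 1).foldl (fun s j =>
        if PySem.List.pyGetD timeList j 0 ≥ PySem.List.pyGetD weekBin (k : Int) 0 ∧
           PySem.List.pyGetD timeList j 0 ≤ PySem.List.pyGetD weekBin ((k : Int) + 1) 0 then
          PySem.Set.add s (PySem.List.pyGetD userList j 0)
        else s) PySem.Set.empty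
      = (PySem.List.enumerate timeList (0 : Int)).foldl (fun s jt =>
          if lo ≤ jt.2 ∧ jt.2 ≤ hi then
            PySem.Set.add s (PySem.List.pyGetD userList jt.1 0) else s) PySem.Set.empty := by
    rw [henum, List.foldl_map]
    simp only [ge_iff_le, hlo, hhi]
  rw [h1]
  have hhyp : ∀ j < timeList.length,
      lo ≤ timeList.getD j 0 ∧ timeList.getD j 0 ≤ hi → 0 + j < userList.length := by
    intro j hj hin
    have := hpre j hj ⟨k, by omega, by
      rw [List.getD_eq_getElem weekBin 0 (by omega : k < weekBin.length),
          List.getD_eq_getElem weekBin 0 hk]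
      exact hin⟩
    omega
  have := pvA_inner lo hi timeList userList 0 PySem.Set.empty hhyp
  simpa using this

-- ===== VERDICT (by name: the statement is the Claim_ definition above) =====
theorem numUserInBin_spec : Claim_equal_numUserInBin := by
  intro weekBin userList timeList _ hpre
  unfold Spec_numUserInBin numUserInBin numUserInBin_alt
  rw [PySem.List.foldl_append_singleton_eq_map, PySem.List.foldl_append_singleton_eq_map]
  simp only [List.nil_append]
  rw [PySem.List.slice_from_one]
  apply List.ext_getElem
  · simp [PySem.List.length_pyRange_one, PySem.List.len_eq, List.length_zip]
  · intro k hk1 hk2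
    simp only [List.length_map] at hk1 hk2
    simp only [List.getElem_map]
    have hkb : k + 1 < weekBin.length := by
      simp [PySem.List.length_pyRange_one, PySem.List.len_eq] at hk1
      omega
    have hrk : (PySem.List.pyRange 0 (PySem.List.len weekBin - 1) 1)[k]'hk1 = (k : Int) := by
      rw [PySem.List.getElem_pyRange_one]
      ring
    rw [hrk]
    have hzk : (weekBin.zip weekBin.tail)[k]'hk2
        = (weekBin[k]'(by omega), weekBin[k + 1]'hkb) := by
      rw [List.getElem_zip]
      congr 1
      rw [List.getElem_tail]
    rw [hzk]
    rw [pvKey weekBin userList timeList hpre k hkb]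
    exact pvBinEq timeList userList (weekBin[k]'(by omega)) (weekBin[k + 1]'hkb)
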